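-- pv_equiv track=rewrite | github.com/SarboledaB/AI-Agent-Avatar | project.py | __overlapClass
-- ===== SOURCE A (Python) =====
-- def __overlapClass(schedulesList, actualSchedule):
--     overlap = True
--     for h2 in actualSchedule:
--         currentOverlap = False
--         for schedule in schedulesList:
--             classes = schedule[1][0]
--             for h1 in classes:
--                 if h1[0] == h2[0]:
--                     # Which one starts before
--                     if h1[1] <= h2[1]:
--                         first, second = h1, h2
--                     else:
--                         first, second = h2, h1
--                     currentOverlap = currentOverlap or first[2] > second[1]
--         overlap = overlap and currentOverlap
--     return overlap
-- ===== SOURCE B (Python) =====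
-- def __overlapClass(schedulesList, actualSchedule):
--     # Index all class intervals by day once, then probe only same-day intervals per entry.
--     byDay = {}
--     for schedule in schedulesList:
--         for h1 in schedule[1][0]:
--             byDay.setdefault(h1[0], []).append((h1[1], h1[2]))
--     for day, start, end in actualSchedule:
--         if not any((e1 > start) if (s1 <= start) else (end > s1)
--                    for (s1, e1) in byDay.get(day, [])):
--             return False
--     return True
-- ===== Notes on version B (the rewrite author's own statement) =====
-- stated objective: faster
-- what changed: B replaces A's rescan of all schedules' classes for every actualSchedule entry by a dict indexing classes by day built once, then checks each entry only against same-day intervals with early exit; Pre_ excludes inputs where schedule[1][0] raises (A skips the access when actualSchedule is empty, B raises there).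
-- outside the precondition, e.g. on __overlapClass([(2, [])], []): A returns True, B raises IndexError
import Mathlib
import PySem

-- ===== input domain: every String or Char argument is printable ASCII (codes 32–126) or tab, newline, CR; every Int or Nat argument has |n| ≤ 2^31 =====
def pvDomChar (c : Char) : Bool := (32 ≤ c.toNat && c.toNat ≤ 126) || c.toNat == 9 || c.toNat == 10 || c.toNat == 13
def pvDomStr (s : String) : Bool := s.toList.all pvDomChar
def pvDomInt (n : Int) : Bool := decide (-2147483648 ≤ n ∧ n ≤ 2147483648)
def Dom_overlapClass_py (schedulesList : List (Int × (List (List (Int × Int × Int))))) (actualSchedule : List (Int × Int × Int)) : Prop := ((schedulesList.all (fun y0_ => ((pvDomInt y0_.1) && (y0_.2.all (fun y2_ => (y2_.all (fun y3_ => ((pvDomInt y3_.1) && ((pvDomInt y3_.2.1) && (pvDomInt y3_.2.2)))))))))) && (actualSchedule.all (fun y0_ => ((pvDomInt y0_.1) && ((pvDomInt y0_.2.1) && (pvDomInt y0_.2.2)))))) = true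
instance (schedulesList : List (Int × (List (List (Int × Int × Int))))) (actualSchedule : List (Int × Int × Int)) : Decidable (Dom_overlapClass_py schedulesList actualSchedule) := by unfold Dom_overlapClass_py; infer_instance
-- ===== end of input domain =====

-- B builds a day-indexed dictionary of class intervals once, then checks each actualSchedule
-- entry only against same-day intervals (alternative/faster single indexing pass; return value only).

-- ===== PORT A =====
-- literal transliteration of A's triple nested loop with its boolean accumulators
def overlapClass_py (schedulesList : List (Int × (List (List (Int × Int × Int))))) (actualSchedule : List (Int × Int × Int)) : Bool :=
  actualSchedule.foldl (fun overlap h2 =>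
    let currentOverlap :=
      schedulesList.foldl (fun cur schedule =>
        let classes := schedule.2.headD []   -- schedule[1][0]; Pre_ excludes schedule[1] = [] (IndexError)
        classes.foldl (fun cur h1 =>
          if h1.1 == h2.1 then
            -- which one starts before; first[2] > second[1]
            cur || (if h1.2.1 ≤ h2.2.1 then decide (h1.2.2 > h2.2.1) else decide (h2.2.2 > h1.2.1))
          else cur) cur) false
    overlap && currentOverlap) true

-- ===== PORT B =====
-- byDay.setdefault(h1[0], []).append((h1[1], h1[2]))
def pvByDay (schedulesList : List (Int × (List (List (Int × Int × Int))))) : PySem.Dict Int (List (Int × Int)) :=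
  schedulesList.foldl (fun d schedule =>
    (schedule.2.headD []).foldl (fun d h1 =>   -- schedule[1][0]; Pre_ excludes schedule[1] = []
      d.modify h1.1 [] (· ++ [(h1.2.1, h1.2.2)])) d) PySem.Dict.empty

def overlapClass_py_alt (schedulesList : List (Int × (List (List (Int × Int × Int))))) (actualSchedule : List (Int × Int × Int)) : Bool :=
  let byDay := pvByDay schedulesList
  actualSchedule.all (fun h2 =>
    (byDay.getD h2.1 []).any (fun p =>
      if p.1 ≤ h2.2.1 then decide (p.2 > h2.2.1) else decide (h2.2.2 > p.1)))

-- ===== PRECONDITION & SPEC =====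
-- Pre_ excludes the inputs where 'schedule[1][0]' raises IndexError: both Pythons raise there,
-- except that A skips the access (returning True) when actualSchedule is empty while B's eager index build still raises.
def Pre_overlapClass_py (schedulesList : List (Int × (List (List (Int × Int × Int))))) (actualSchedule : List (Int × Int × Int)) : Prop :=
  ∀ schedule ∈ schedulesList, schedule.2 ≠ []
instance (schedulesList : List (Int × (List (List (Int × Int × Int))))) (actualSchedule : List (Int × Int × Int)) : Decidable (Pre_overlapClass_py schedulesList actualSchedule) := by unfold Pre_overlapClass_py; infer_instance

def pvWitness_overlapClass_py : (List (Int × (List (List (Int × Int × Int))))) × (List (Int × Int × Int)) :=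
  ([(1, [[(0, 1, 3)]])], [(0, 2, 4)])

def Spec_overlapClass_py (schedulesList : List (Int × (List (List (Int × Int × Int))))) (actualSchedule : List (Int × Int × Int)) (out : Bool) : Prop := out = overlapClass_py_alt schedulesList actualSchedule
instance (schedulesList : List (Int × (List (List (Int × Int × Int))))) (actualSchedule : List (Int × Int × Int)) (out : Bool) : Decidable (Spec_overlapClass_py schedulesList actualSchedule out) := by unfold Spec_overlapClass_py; infer_instance

-- ===== CLAIM (what is proved, stated in full; the proofs are below) =====
def Claim_equal_overlapClass_py : Prop := ∀ (schedulesList : List (Int × (List (List (Int × Int × Int))))) (actualSchedule : List (Int × Int × Int)), Dom_overlapClass_py schedulesList actualSchedule → Pre_overlapClass_py schedulesList actualSchedule → Spec_overlapClass_py schedulesList actualSchedule (overlapClass_py schedulesList actualSchedule)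

-- ===== LEMMAS AND PROOFS =====

-- all class rows, in traversal order
def pvClasses (schedulesList : List (Int × (List (List (Int × Int × Int))))) : List (Int × Int × Int) :=
  schedulesList.flatMap (fun schedule => schedule.2.headD [])

theorem pvFoldlOr {α : Type} (f : α → Bool) : ∀ (l : List α) (b : Bool),
    l.foldl (fun c x => c || f x) b = (b || l.any f) := by
  intro l
  induction l with
  | nil => simp
  | cons x xs ih => intro b; simp [List.foldl_cons, ih, Bool.or_assoc]

theorem pvFoldlAnd {α : Type} (f : α → Bool) : ∀ (l : List α) (b : Bool),
    l.foldl (fun c x => c && f x) b = (b && l.all f) := by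
  intro l
  induction l with
  | nil => simp
  | cons x xs ih => intro b; simp [List.foldl_cons, ih, Bool.and_assoc]

-- A's inner double loop computes 'any over all class rows'
theorem pvInnerA (schedulesList : List (Int × (List (List (Int × Int × Int))))) (h2 : Int × Int × Int) :
    schedulesList.foldl (fun cur schedule =>
      (schedule.2.headD []).foldl (fun cur h1 =>
        if h1.1 == h2.1 then
          cur || (if h1.2.1 ≤ h2.2.1 then decide (h1.2.2 > h2.2.1) else decide (h2.2.2 > h1.2.1))
        else cur) cur) false
    = (pvClasses schedulesList).any (fun h1 =>
        h1.1 == h2.1 && (if h1.2.1 ≤ h2.2.1 then decide (h1.2.2 > h2.2.1) else decide (h2.2.2 > h1.2.1))) := by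
  have hstep : (fun (cur : Bool) (h1 : Int × Int × Int) =>
      if h1.1 == h2.1 then
        cur || (if h1.2.1 ≤ h2.2.1 then decide (h1.2.2 > h2.2.1) else decide (h2.2.2 > h1.2.1))
      else cur)
      = (fun cur h1 => cur ||
          (h1.1 == h2.1 && (if h1.2.1 ≤ h2.2.1 then decide (h1.2.2 > h2.2.1) else decide (h2.2.2 > h1.2.1)))) := by
    funext cur h1
    by_cases h : h1.1 == h2.1 <;> simp [h]
  rw [show (pvClasses schedulesList).any _ = _ from rfl, pvClasses, ← List.foldl_flatMap]
  rw [List.foldl_flatMap]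
  simp only [hstep]
  rw [← List.foldl_flatMap, pvFoldlOr, Bool.false_or]

-- B's dictionary groups the class rows by day
theorem pvByDay_getD (schedulesList : List (Int × (List (List (Int × Int × Int))))) (k : Int) :
    (pvByDay schedulesList).getD k []
    = ((pvClasses schedulesList).filter (fun h1 => h1.1 == k)).map (fun h1 => (h1.2.1, h1.2.2)) := by
  rw [pvByDay, ← List.foldl_flatMap, ← pvClasses]
  have hmap : (pvClasses schedulesList).foldl
      (fun (d : PySem.Dict Int (List (Int × Int))) h1 => d.modify h1.1 [] (· ++ [(h1.2.1, h1.2.2)])) PySem.Dict.empty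
      = ((pvClasses schedulesList).map (fun h1 => (h1.1, (h1.2.1, h1.2.2)))).foldl
          (fun d p => d.modify p.1 [] (· ++ [p.2])) PySem.Dict.empty := by
    rw [List.foldl_map]
  rw [hmap, PySem.Dict.getD_foldl_modify_append, PySem.Dict.getD_empty, List.nil_append,
    List.filter_map]
  simp [Function.comp_def]

theorem pvEntryEq (schedulesList : List (Int × (List (List (Int × Int × Int))))) (h2 : Int × Int × Int) :
    ((pvByDay schedulesList).getD h2.1 []).any (fun p =>
      if p.1 ≤ h2.2.1 then decide (p.2 > h2.2.1) else decide (h2.2.2 > p.1))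
    = (pvClasses schedulesList).any (fun h1 =>
        h1.1 == h2.1 && (if h1.2.1 ≤ h2.2.1 then decide (h1.2.2 > h2.2.1) else decide (h2.2.2 > h1.2.1))) := by
  rw [pvByDay_getD, List.any_map, List.any_filter]
  rfl

-- ===== VERDICT (by name: the statement is the Claim_ definition above) =====
theorem overlapClass_py_spec : Claim_equal_overlapClass_py := by
  intro schedulesList actualSchedule _hDom _hPre
  unfold Spec_overlapClass_py overlapClass_py overlapClass_py_alt
  simp only [pvInnerA, pvFoldlAnd, Bool.true_and]
  congr 1
  funext h2
  rw [pvEntryEq]
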